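-- pv_equiv track=rewrite | github.com/JonnySB/advent-of-code | 03_gear_ratios/challenge_1.py | get_chunk_indexes
-- ===== SOURCE A (Python) =====
-- def get_chunk_indexes(line):
--     chunk_indexes = []
--     chunk_index_dict = {}
--     for index in range(len(line)):
--         num = line[index]
--         if num.isnumeric():
--             if chunk_index_dict.get("start") is None:
--                 chunk_index_dict["start"] = int(index)
--                 chunk_index_dict["end"] = int(index) + 1
--             else:
--                 chunk_index_dict["end"] = int(index) + 1
--         elif chunk_index_dict.get("start") is not None:
--             chunk_indexes.append(chunk_index_dict)
--             chunk_index_dict = {}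
--     if chunk_index_dict.get("start") is not None:
--         chunk_indexes.append(chunk_index_dict)
--     return chunk_indexes
-- ===== SOURCE B (Python) =====
-- def get_chunk_indexes(line):
--     # run scanner: jump over each maximal digit run with a second pointer
--     chunk_indexes = []
--     i = 0
--     n = len(line)
--     while i < n:
--         if line[i].isnumeric():
--             j = i + 1
--             while j < n and line[j].isnumeric():
--                 j += 1
--             chunk_indexes.append({"start": i, "end": j})
--             i = j
--         else:
--             i += 1
--     return chunk_indexes
-- ===== Notes on version B (the rewrite author's own statement) =====
-- stated objective: simpler
-- what changed: Replaced A's per-character state machine (a dict carried across iterations, mutated and flushed on boundaries) by a two-pointer run scanner that finds each maximal digit run directly and emits {start, end} in one step.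
import Mathlib
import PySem

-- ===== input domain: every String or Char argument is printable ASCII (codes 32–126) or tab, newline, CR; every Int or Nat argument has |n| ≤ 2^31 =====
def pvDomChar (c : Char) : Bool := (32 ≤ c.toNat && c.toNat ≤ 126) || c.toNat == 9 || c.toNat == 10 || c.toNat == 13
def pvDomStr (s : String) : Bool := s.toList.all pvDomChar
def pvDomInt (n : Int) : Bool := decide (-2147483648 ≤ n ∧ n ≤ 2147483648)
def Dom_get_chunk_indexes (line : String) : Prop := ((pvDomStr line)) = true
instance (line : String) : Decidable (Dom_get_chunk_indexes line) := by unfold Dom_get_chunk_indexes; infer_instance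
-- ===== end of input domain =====

-- B replaces A's per-character dict state machine by a two-pointer maximal-run scanner (objective: simpler).

-- ===== PORT A =====
-- str.isnumeric() is ported as PySem.Chars.isdigit: exact on the ASCII domain Dom_.
def get_chunk_indexes (line : String) : List (List (String × Int)) :=
  let cs := line.toList
  let st := (PySem.List.pyRange 0 (PySem.Str.len line) 1).foldl
    (fun (st : List (List (String × Int)) × PySem.Dict String Int) (index : Int) =>
      let num := PySem.List.pyGetD cs index ' '   -- index ∈ range(len(line)): the default is never used
      if PySem.Chars.isdigit num then
        if (PySem.Dict.get? st.2 "start").isNone then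
          (st.1, (st.2.insert "start" index).insert "end" (index + 1))
        else
          (st.1, st.2.insert "end" (index + 1))
      else if (PySem.Dict.get? st.2 "start").isNone then st
      else (st.1 ++ [st.2.items], PySem.Dict.empty))
    ([], PySem.Dict.empty)
  if (PySem.Dict.get? st.2 "start").isNone then st.1 else st.1 ++ [st.2.items]

-- ===== PORT B =====
-- inner while loop: length of the leading digit run
def pvRunLen : List Char → Nat
  | [] => 0
  | c :: rest => if PySem.Chars.isdigit c then pvRunLen rest + 1 else 0

-- outer while loop: i is the current position
def pvScan : List Char → Int → List (List (String × Int))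
  | [], _ => []
  | c :: rest, i =>
    if PySem.Chars.isdigit c then
      let k := pvRunLen rest
      [("start", i), ("end", i + 1 + (k : Int))] :: pvScan (rest.drop k) (i + 1 + (k : Int))
    else pvScan rest (i + 1)
  termination_by cs _ => cs.length
  decreasing_by
  · simp only [List.length_drop, List.length_cons]; omega
  · simp

def get_chunk_indexes_alt (line : String) : List (List (String × Int)) :=
  pvScan line.toList 0

-- ===== PRECONDITION & SPEC =====
def Spec_get_chunk_indexes (line : String) (out : List (List (String × Int))) : Prop := out = get_chunk_indexes_alt line
instance (line : String) (out : List (List (String × Int))) : Decidable (Spec_get_chunk_indexes line out) := by unfold Spec_get_chunk_indexes; infer_instance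

-- ===== CLAIM (what is proved, stated in full; the proofs are below) =====
def Claim_equal_get_chunk_indexes : Prop := ∀ (line : String), Dom_get_chunk_indexes line → Spec_get_chunk_indexes line (get_chunk_indexes line)

-- ===== LEMMAS AND PROOFS =====

-- A's loop body, over (index, char) pairs
def pvAStep (st : List (List (String × Int)) × PySem.Dict String Int) (p : Int × Char) :
    List (List (String × Int)) × PySem.Dict String Int :=
  if PySem.Chars.isdigit p.2 then
    if (PySem.Dict.get? st.2 "start").isNone then
      (st.1, (st.2.insert "start" p.1).insert "end" (p.1 + 1))
    else
      (st.1, st.2.insert "end" (p.1 + 1))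
  else if (PySem.Dict.get? st.2 "start").isNone then st
  else (st.1 ++ [st.2.items], PySem.Dict.empty)

def pvFinish (st : List (List (String × Int)) × PySem.Dict String Int) : List (List (String × Int)) :=
  if (PySem.Dict.get? st.2 "start").isNone then st.1 else st.1 ++ [st.2.items]

theorem pvA_eq_enum (line : String) :
    get_chunk_indexes line =
      pvFinish ((PySem.List.enumerate line.toList 0).foldl pvAStep ([], PySem.Dict.empty)) := by
  unfold get_chunk_indexes pvFinish
  rw [PySem.List.enumerate_eq_map_pyRange line.toList ' ', List.foldl_map]
  rfl

-- the mid-run dict [("start",s),("end",i)]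
def pvMid (s i : Int) : PySem.Dict String Int :=
  (PySem.Dict.empty.insert "start" s).insert "end" i

theorem pvMid_get_start (s i : Int) : (PySem.Dict.get? (pvMid s i) "start").isNone = false := by
  unfold pvMid
  rw [PySem.Dict.get?_insert_of_ne _ _ (by decide), PySem.Dict.get?_insert_self]
  rfl

theorem pvMid_insert_end (s i j : Int) : (pvMid s i).insert "end" j = pvMid s j := rfl

theorem pvMid_items (s i : Int) : (pvMid s i).items = [("start", s), ("end", i)] := by
  rfl

-- joint loop invariant: from the empty dict (L1) and from a mid-run dict (L2)
theorem pvLoop (cs : List Char) :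
    (∀ (i : Int) (acc : List (List (String × Int))),
      pvFinish ((PySem.List.enumerate cs i).foldl pvAStep (acc, PySem.Dict.empty)) =
        acc ++ pvScan cs i) ∧
    (∀ (i s : Int) (acc : List (List (String × Int))),
      pvFinish ((PySem.List.enumerate cs i).foldl pvAStep (acc, pvMid s i)) =
        acc ++ [("start", s), ("end", i + (pvRunLen cs : Int))] :: pvScan (cs.drop (pvRunLen cs)) (i + (pvRunLen cs : Int))) := by
  induction cs with
  | nil =>
    constructor
    · intro i acc
      simp [PySem.List.enumerate_nil, pvFinish, pvScan, PySem.Dict.get?_empty]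
    · intro i s acc
      simp [PySem.List.enumerate_nil, pvFinish, pvRunLen, pvScan, pvMid_get_start, pvMid_items]
  | cons c rest ih =>
    obtain ⟨ih1, ih2⟩ := ih
    constructor
    · intro i acc
      rw [PySem.List.enumerate_cons, List.foldl_cons]
      by_cases hd : PySem.Chars.isdigit c = true
      · have : pvAStep (acc, PySem.Dict.empty) (i, c) = (acc, pvMid i (i + 1)) := by
          simp [pvAStep, hd, PySem.Dict.get?_empty, pvMid]
        rw [this, ih2 (i + 1) i acc]
        simp only [pvScan, hd, if_pos]
      · have : pvAStep (acc, PySem.Dict.empty) (i, c) = (acc, PySem.Dict.empty) := by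
          simp [pvAStep, hd, PySem.Dict.get?_empty]
        rw [this, ih1 (i + 1) acc]
        simp [pvScan, hd]
    · intro i s acc
      rw [PySem.List.enumerate_cons, List.foldl_cons]
      by_cases hd : PySem.Chars.isdigit c = true
      · have : pvAStep (acc, pvMid s i) (i, c) = (acc, pvMid s (i + 1)) := by
          simp [pvAStep, hd, pvMid_get_start, pvMid_insert_end]
        rw [this, ih2 (i + 1) s acc]
        simp only [pvRunLen, hd, if_pos, List.drop_succ_cons]
        push_cast
        ring_nf
      · have : pvAStep (acc, pvMid s i) (i, c) = (acc ++ [[("start", s), ("end", i)]], PySem.Dict.empty) := by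
          simp [pvAStep, hd, pvMid_get_start, pvMid_items]
        rw [this, ih1 (i + 1) (acc ++ [[("start", s), ("end", i)]])]
        simp [pvScan, pvRunLen, hd]

-- ===== VERDICT (by name: the statement is the Claim_ definition above) =====
theorem get_chunk_indexes_spec : Claim_equal_get_chunk_indexes := by
  intro line _
  unfold Spec_get_chunk_indexes get_chunk_indexes_alt
  rw [pvA_eq_enum]
  exact (pvLoop line.toList).1 0 []
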